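-- pv_equiv track=rewrite | github.com/itsomar278/testGenie | dotnet_test_generator/parsing/change_detector.py | _extract_layer
-- ===== SOURCE A (Python) =====
-- def _extract_layer(proj_name_lower: str) -> str | None:
--     """
--     Extract the DDD layer from a .csproj name (case-insensitive).
--
--     Handles both source and test projects:
--       "dashboardmanagement.application"       -> "application"
--       "dashboardmanagement.application.tests" -> "application"
--       "dashboardmanagement.domain.tests"      -> "domain"
--       "dashboardmanagement.api"               -> "api"
--     """
--     # Strip .tests / .test suffix first
--     name = proj_name_lower
--     for suffix in ['.tests', '.test']:
--         if name.endswith(suffix):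
--             name = name[:-len(suffix)]
--             break
--
--     # Now check if it ends with a known layer
--     for layer in ['application', 'domain', 'api', 'infrastructure']:
--         if name.endswith(f'.{layer}'):
--             return layer
--
--     return None
-- ===== SOURCE B (Python) =====
-- def _extract_layer(proj_name_lower: str) -> str | None:
--     """Segment-based reimplementation: split on '.', drop a trailing
--     'tests'/'test' segment, and accept the last segment iff it is a known
--     layer preceded by at least one other segment."""
--     segs = proj_name_lower.split('.')
--     if segs[-1] in ('tests', 'test'):
--         segs.pop()
--     if len(segs) >= 2 and segs[-1] in ('application', 'domain', 'api', 'infrastructure'):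
--         return segs[-1]
--     return None
-- ===== Notes on version B (the rewrite author's own statement) =====
-- stated objective: idiomatic
-- what changed: Replaces A's two iterative endswith-suffix loops (first stripping a test-project suffix, then probing each dot-prefixed layer name) by a single split on the dot separator into segments: drop a trailing test-marker segment and accept the last segment iff it is a known layer name with at least one segment before it.
import Mathlib
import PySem

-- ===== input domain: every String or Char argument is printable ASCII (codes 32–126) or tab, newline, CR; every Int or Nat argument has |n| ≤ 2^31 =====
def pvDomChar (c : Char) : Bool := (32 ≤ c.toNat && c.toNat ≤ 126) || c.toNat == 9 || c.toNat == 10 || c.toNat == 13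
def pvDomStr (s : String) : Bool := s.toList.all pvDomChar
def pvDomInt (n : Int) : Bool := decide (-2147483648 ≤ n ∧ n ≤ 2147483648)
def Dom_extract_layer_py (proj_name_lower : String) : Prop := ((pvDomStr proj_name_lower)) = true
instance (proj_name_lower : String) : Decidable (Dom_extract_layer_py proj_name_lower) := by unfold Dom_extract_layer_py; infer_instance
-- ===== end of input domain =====

-- B replaces A's two endswith-suffix loops by one split('.') into segments (idiomatic; same cost).


-- ===== PORT A =====
-- for suffix in ['.tests', '.test']: if name.endswith(suffix): name = name[:-len(suffix)]; break
def pvStripLoop : List (List Char) → List Char → List Char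
  | [], name => name
  | suf :: rest, name =>
    if PySem.Chars.endswith name suf then PySem.List.slice name none (some (-(suf.length : Int)))
    else pvStripLoop rest name

-- for layer in ['application', 'domain', 'api', 'infrastructure']: if name.endswith('.' + layer): return layer
def pvLayerLoop : List (List Char) → List Char → Option String
  | [], _ => none
  | l :: rest, name =>
    if PySem.Chars.endswith name ('.' :: l) then some (String.mk l)
    else pvLayerLoop rest name

def extract_layer_py (proj_name_lower : String) : Option String :=
  pvLayerLoop ["application".toList, "domain".toList, "api".toList, "infrastructure".toList]
    (pvStripLoop [".tests".toList, ".test".toList] proj_name_lower.toList)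

-- ===== PORT B =====
def extract_layer_py_alt (proj_name_lower : String) : Option String :=
  let segs0 := proj_name_lower.toList.splitOn '.'      -- segs = proj_name_lower.split('.')
  let segs :=                                          -- if segs[-1] in ('tests', 'test'): segs.pop()
    if segs0.getLast? = some "tests".toList ∨ segs0.getLast? = some "test".toList
    then segs0.dropLast else segs0
  match segs.getLast? with                             -- len(segs) >= 2 and segs[-1] in (...)
  | none => none
  | some x =>
    if 2 ≤ segs.length ∧
       (x = "application".toList ∨ x = "domain".toList ∨ x = "api".toList ∨ x = "infrastructure".toList)
    then some (String.mk x) else none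

-- ===== PRECONDITION & SPEC =====
def Spec_extract_layer_py (proj_name_lower : String) (out : Option String) : Prop := out = extract_layer_py_alt proj_name_lower
instance (proj_name_lower : String) (out : Option String) : Decidable (Spec_extract_layer_py proj_name_lower out) := by unfold Spec_extract_layer_py; infer_instance

-- ===== CLAIM (what is proved, stated in full; the proofs are below) =====
def Claim_equal_extract_layer_py : Prop := ∀ (proj_name_lower : String), Dom_extract_layer_py proj_name_lower → Spec_extract_layer_py proj_name_lower (extract_layer_py proj_name_lower)

-- ===== LEMMAS AND PROOFS =====

-- [x].intercalate distributes over appending a final singleton block.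
theorem pv_intercalate_concat (x : Char) (t : List Char) :
    ∀ ys : List (List Char), ys ≠ [] →
      [x].intercalate (ys ++ [t]) = [x].intercalate ys ++ x :: t := by
  intro ys hys
  induction ys with
  | nil => exact absurd rfl hys
  | cons a ys ih =>
    cases ys with
    | nil => simp [List.intercalate, List.intersperse]
    | cons b ys =>
      have h2 := ih (by simp)
      simp only [List.intercalate, List.cons_append, List.intersperse_cons₂,
        List.flatten_cons] at h2 ⊢
      simp [h2]

-- splitOn '.' of a dot-free tail t glued after a dot: append [t].
theorem pv_splitOn_append_dot (a t : List Char) (ht : '.' ∉ t) :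
    (a ++ '.' :: t).splitOn '.' = a.splitOn '.' ++ [t] := by
  simp only [List.splitOn]
  rw [List.splitOnP_append_cons _ _ _ '.' (by simp),
    List.splitOnP_eq_single (xs := t) _ (by intro y hy hb; exact ht ((beq_iff_eq.mp hb) ▸ hy))]

-- ends-with '.t' (t dot-free) ⟷ last splitOn-'.' segment is t and there are ≥ 2 segments
theorem pv_endswith_dot_iff (cs t : List Char) (ht : '.' ∉ t) :
    PySem.Chars.endswith cs ('.' :: t) = true ↔
      2 ≤ (cs.splitOn '.').length ∧ (cs.splitOn '.').getLast? = some t := by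
  rw [PySem.Chars.endswith_iff]
  constructor
  · rintro ⟨a, rfl⟩
    rw [pv_splitOn_append_dot a t ht]
    have hne : a.splitOn '.' ≠ [] := List.splitOnP_ne_nil _ a
    refine ⟨?_, by simp⟩
    have := List.length_pos_of_ne_nil hne
    simp only [List.length_append, List.length_cons, List.length_nil]
    omega
  · rintro ⟨hlen, hlast⟩
    have hne : cs.splitOn '.' ≠ [] := List.splitOnP_ne_nil _ cs
    have hgl : (cs.splitOn '.').getLast hne = t :=
      Option.some_inj.mp ((List.getLast?_eq_some_getLast hne).symm.trans hlast)
    have hdecomp : (cs.splitOn '.').dropLast ++ [t] = cs.splitOn '.' := by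
      rw [← hgl]; exact List.dropLast_concat_getLast hne
    have hdne : (cs.splitOn '.').dropLast ≠ [] := by
      intro h
      rw [h, List.nil_append] at hdecomp
      rw [← hdecomp] at hlen
      simp at hlen
    refine ⟨['.'].intercalate (cs.splitOn '.').dropLast, ?_⟩
    conv_rhs => rw [← List.intercalate_splitOn cs '.', ← hdecomp]
    rw [pv_intercalate_concat _ _ _ hdne]

-- a length-1 list with known getLast? is that singleton
theorem pv_eq_singleton_of_len_one {α : Type} (l : List α) (x : α)
    (h1 : l.length = 1) (h2 : l.getLast? = some x) : l = [x] := by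
  cases l with
  | nil => simp at h1
  | cons a l =>
    cases l with
    | nil => simpa using h2
    | cons b l => simp at h1

-- pvLayerLoop characterised through the splitOn view of its name argument
theorem pv_layerLoop_eq (name x : List Char) (hP : (name.splitOn '.').getLast? = some x) :
    pvLayerLoop ["application".toList, "domain".toList, "api".toList, "infrastructure".toList] name =
      (if 2 ≤ (name.splitOn '.').length ∧
          (x = "application".toList ∨ x = "domain".toList ∨ x = "api".toList ∨ x = "infrastructure".toList)
       then some (String.mk x) else none) := by
  have hcase : ∀ l : List Char, '.' ∉ l →
      (PySem.Chars.endswith name ('.' :: l) = true ↔ 2 ≤ (name.splitOn '.').length ∧ x = l) := by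
    intro l hl
    rw [pv_endswith_dot_iff name l hl, hP]
    simp
  simp only [pvLayerLoop]
  by_cases hlen : 2 ≤ (name.splitOn '.').length
  · by_cases h1 : x = "application".toList
    · subst h1
      rw [if_pos ((hcase _ (by decide)).mpr ⟨hlen, rfl⟩), if_pos ⟨hlen, Or.inl rfl⟩]
    · have e1 : PySem.Chars.endswith name ('.' :: "application".toList) = false := by
        cases hE : PySem.Chars.endswith name ('.' :: "application".toList) with
        | false => rfl
        | true => exact absurd ((hcase _ (by decide)).mp hE).2 h1
      rw [e1, if_neg Bool.false_ne_true]
      by_cases h2 : x = "domain".toList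
      · subst h2
        rw [if_pos ((hcase _ (by decide)).mpr ⟨hlen, rfl⟩), if_pos ⟨hlen, Or.inr (Or.inl rfl)⟩]
      · have e2 : PySem.Chars.endswith name ('.' :: "domain".toList) = false := by
          cases hE : PySem.Chars.endswith name ('.' :: "domain".toList) with
          | false => rfl
          | true => exact absurd ((hcase _ (by decide)).mp hE).2 h2
        rw [e2, if_neg Bool.false_ne_true]
        by_cases h3 : x = "api".toList
        · subst h3
          rw [if_pos ((hcase _ (by decide)).mpr ⟨hlen, rfl⟩),
            if_pos ⟨hlen, Or.inr (Or.inr (Or.inl rfl))⟩]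
        · have e3 : PySem.Chars.endswith name ('.' :: "api".toList) = false := by
            cases hE : PySem.Chars.endswith name ('.' :: "api".toList) with
            | false => rfl
            | true => exact absurd ((hcase _ (by decide)).mp hE).2 h3
          rw [e3, if_neg Bool.false_ne_true]
          by_cases h4 : x = "infrastructure".toList
          · subst h4
            rw [if_pos ((hcase _ (by decide)).mpr ⟨hlen, rfl⟩),
              if_pos ⟨hlen, Or.inr (Or.inr (Or.inr rfl))⟩]
          · have e4 : PySem.Chars.endswith name ('.' :: "infrastructure".toList) = false := by
              cases hE : PySem.Chars.endswith name ('.' :: "infrastructure".toList) with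
              | false => rfl
              | true => exact absurd ((hcase _ (by decide)).mp hE).2 h4
            rw [e4, if_neg Bool.false_ne_true,
              if_neg (by rintro ⟨-, h | h | h | h⟩; exacts [h1 h, h2 h, h3 h, h4 h])]
  · have ef : ∀ l : List Char, '.' ∉ l → PySem.Chars.endswith name ('.' :: l) = false := by
      intro l hl
      cases hE : PySem.Chars.endswith name ('.' :: l) with
      | false => rfl
      | true => exact absurd ((hcase _ hl).mp hE).1 hlen
    rw [ef _ (by decide), if_neg Bool.false_ne_true, ef _ (by decide),
      if_neg Bool.false_ne_true, ef _ (by decide), if_neg Bool.false_ne_true,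
      ef _ (by decide), if_neg Bool.false_ne_true, if_neg (fun h => hlen h.1)]

-- the strip step: A's slice removes exactly the '.t' suffix
theorem pv_slice_strip (a t : List Char) :
    PySem.List.slice (a ++ '.' :: t) none (some (-((('.' :: t).length : Nat) : Int))) = a := by
  rw [PySem.List.slice_to_neg_natCast (a ++ '.' :: t) ('.' :: t).length (by simp)]
  have h : (a ++ '.' :: t).length - ('.' :: t).length = a.length := by simp
  rw [h, List.take_left]

-- both ports compute the same value (let-free form of B's body)
theorem pv_main (cs : List Char) :
    pvLayerLoop ["application".toList, "domain".toList, "api".toList, "infrastructure".toList]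
      (pvStripLoop [".tests".toList, ".test".toList] cs) =
      (match (if (cs.splitOn '.').getLast? = some "tests".toList ∨
                 (cs.splitOn '.').getLast? = some "test".toList
              then (cs.splitOn '.').dropLast else cs.splitOn '.').getLast? with
       | none => none
       | some x =>
         if 2 ≤ (if (cs.splitOn '.').getLast? = some "tests".toList ∨
                    (cs.splitOn '.').getLast? = some "test".toList
                 then (cs.splitOn '.').dropLast else cs.splitOn '.').length ∧
            (x = "application".toList ∨ x = "domain".toList ∨ x = "api".toList ∨ x = "infrastructure".toList)
         then some (String.mk x) else none) := by
  by_cases h1 : PySem.Chars.endswith cs (".tests".toList) = true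
  · -- strip '.tests'
    obtain ⟨a, rfl⟩ := (PySem.Chars.endswith_iff _ _).mp h1
    have hsplit : ((a ++ ".tests".toList).splitOn '.') = a.splitOn '.' ++ ["tests".toList] :=
      pv_splitOn_append_dot a "tests".toList (by decide)
    have hstrip : pvStripLoop [".tests".toList, ".test".toList] (a ++ ".tests".toList) = a := by
      simp only [pvStripLoop]
      rw [if_pos h1]
      exact pv_slice_strip a "tests".toList
    obtain ⟨x, hx⟩ : ∃ x, (a.splitOn '.').getLast? = some x := by
      cases h : (a.splitOn '.').getLast? with
      | none => exact absurd (List.getLast?_eq_none_iff.mp h) (List.splitOnP_ne_nil _ a)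
      | some y => exact ⟨y, rfl⟩
    rw [hstrip, pv_layerLoop_eq a x hx]
    simp only [hsplit, List.getLast?_concat, List.dropLast_concat, Option.some.injEq, true_or, if_true, hx]
  · by_cases h2 : PySem.Chars.endswith cs (".test".toList) = true
    · -- strip '.test'
      obtain ⟨a, rfl⟩ := (PySem.Chars.endswith_iff _ _).mp h2
      have hsplit : ((a ++ ".test".toList).splitOn '.') = a.splitOn '.' ++ ["test".toList] :=
        pv_splitOn_append_dot a "test".toList (by decide)
      have hstrip : pvStripLoop [".tests".toList, ".test".toList] (a ++ ".test".toList) = a := by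
        have h1f : PySem.Chars.endswith (a ++ ".test".toList) (".tests".toList) = false := by
          cases hE : PySem.Chars.endswith (a ++ ".test".toList) (".tests".toList) with
          | false => rfl
          | true => exact absurd hE h1
        simp only [pvStripLoop]
        rw [h1f, if_neg Bool.false_ne_true, if_pos h2]
        exact pv_slice_strip a "test".toList
      obtain ⟨x, hx⟩ : ∃ x, (a.splitOn '.').getLast? = some x := by
        cases h : (a.splitOn '.').getLast? with
        | none => exact absurd (List.getLast?_eq_none_iff.mp h) (List.splitOnP_ne_nil _ a)
        | some y => exact ⟨y, rfl⟩
      rw [hstrip, pv_layerLoop_eq a x hx]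
      simp only [hsplit, List.getLast?_concat, List.dropLast_concat, Option.some.injEq,
        or_true, if_true, hx]
    · -- no strip
      have h1f : PySem.Chars.endswith cs (".tests".toList) = false := by
        cases hE : PySem.Chars.endswith cs (".tests".toList) with
        | false => rfl
        | true => exact absurd hE h1
      have h2f : PySem.Chars.endswith cs (".test".toList) = false := by
        cases hE : PySem.Chars.endswith cs (".test".toList) with
        | false => rfl
        | true => exact absurd hE h2
      have hstrip : pvStripLoop [".tests".toList, ".test".toList] cs = cs := by
        simp only [pvStripLoop]
        rw [h1f, if_neg Bool.false_ne_true, h2f, if_neg Bool.false_ne_true]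
      rw [hstrip]
      obtain ⟨x, hx⟩ : ∃ x, (cs.splitOn '.').getLast? = some x := by
        cases h : (cs.splitOn '.').getLast? with
        | none => exact absurd (List.getLast?_eq_none_iff.mp h) (List.splitOnP_ne_nil _ cs)
        | some y => exact ⟨y, rfl⟩
      rw [pv_layerLoop_eq cs x hx]
      by_cases hC : (cs.splitOn '.').getLast? = some "tests".toList ∨
          (cs.splitOn '.').getLast? = some "test".toList
      · -- degenerate: cs itself is a single 'tests'/'test' segment; both sides give none
        have hlen1 : (cs.splitOn '.').length = 1 := by
          have hge : 1 ≤ (cs.splitOn '.').length :=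
            List.length_pos_of_ne_nil (List.splitOnP_ne_nil _ cs)
          by_contra hne
          have hlen2 : 2 ≤ (cs.splitOn '.').length := by omega
          cases hC with
          | inl h =>
            have hX : PySem.Chars.endswith cs (".tests".toList) = true := by
              show PySem.Chars.endswith cs ('.' :: "tests".toList) = true
              exact (pv_endswith_dot_iff cs "tests".toList (by decide)).mpr ⟨hlen2, h⟩
            exact h1 hX
          | inr h =>
            have hX : PySem.Chars.endswith cs (".test".toList) = true := by
              show PySem.Chars.endswith cs ('.' :: "test".toList) = true
              exact (pv_endswith_dot_iff cs "test".toList (by decide)).mpr ⟨hlen2, h⟩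
            exact h2 hX
        rw [if_neg (fun h => by rw [hlen1] at h; omega), if_pos hC]
        have hsing : cs.splitOn '.' = [x] := pv_eq_singleton_of_len_one _ _ hlen1 hx
        simp only [hsing, List.dropLast_singleton, List.getLast?_nil]
      · rw [if_neg hC]
        simp only [hx]

-- ===== VERDICT (by name: the statement is the Claim_ definition above) =====
theorem extract_layer_py_spec : Claim_equal_extract_layer_py := by
  intro s _
  unfold Spec_extract_layer_py extract_layer_py extract_layer_py_alt
  exact pv_main s.toList
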